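-- pv_equiv track=rewrite | github.com/MrBrantCode/unitest_baseline | mut_generate/mist_train_cf/cf_71709/solution.py | count_upper_prime
-- ===== SOURCE A (Python) =====
-- def count_upper_prime(s):
--     def is_prime(n):
--         """ Helper function to check if a number is prime """
--         if n == 0 or n == 1:
--             return False
--         for x in range(2, n//2 + 1):
--             if n % x == 0:
--                 return False
--         return True
--
--     """ Count the number of uppercase vowels at prime-numbered positions """
--     count = 0
--     for i in range(len(s)):
--         if is_prime(i + 1):  # +1 for 1-based indexing
--             if s[i] in 'AEIOU':
--                 count += 1
--     return count
-- ===== SOURCE B (Python) =====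
-- def count_upper_prime(s):
--     def is_prime(n):
--         if n < 2:
--             return False
--         x = 2
--         while x * x <= n:
--             if n % x == 0:
--                 return False
--             x += 1
--         return True
--     return sum(1 for i, c in enumerate(s, 1) if c in 'AEIOU' and is_prime(i))
-- ===== Notes on version B (the rewrite author's own statement) =====
-- stated objective: faster
-- what changed: Replaces per-position trial division up to n//2 with trial division only while x*x <= n, and counts via a single generator over enumerate(s, 1) testing the cheap vowel check first.
import Mathlib
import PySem

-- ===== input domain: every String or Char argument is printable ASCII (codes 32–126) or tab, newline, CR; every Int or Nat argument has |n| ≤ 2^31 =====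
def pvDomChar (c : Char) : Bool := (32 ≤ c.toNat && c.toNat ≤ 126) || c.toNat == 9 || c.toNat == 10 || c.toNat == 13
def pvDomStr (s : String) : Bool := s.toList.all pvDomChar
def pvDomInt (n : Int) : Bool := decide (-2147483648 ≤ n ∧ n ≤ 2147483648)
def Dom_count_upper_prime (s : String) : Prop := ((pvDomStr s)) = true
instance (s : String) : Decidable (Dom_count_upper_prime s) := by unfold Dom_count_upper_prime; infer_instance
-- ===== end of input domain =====

-- B replaces A's per-position trial division up to n//2 by trial division only while x*x <= n
-- and counts in one generator pass over enumerate(s, 1), testing the cheap vowel check first (objective: faster).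

-- ===== PORT A =====
-- A's inner is_prime: trial division over range(2, n//2 + 1), early return ported as List.any
def pvIsPrimeA (n : Int) : Bool :=
  if n == 0 || n == 1 then false
  else !((PySem.List.pyRange 2 (PySem.Int.floordiv n 2 + 1) 1).any (fun x => PySem.Int.mod n x == 0))

def pvVowels : List Char := ['A', 'E', 'I', 'O', 'U']

-- s[i] is always in range inside the loop, so the total pyGetD form is exact here
def count_upper_prime (s : String) : Int :=
  (PySem.List.pyRange 0 (PySem.Str.len s) 1).foldl
    (fun count i =>
      if pvIsPrimeA (i + 1) then
        (if pvVowels.contains (PySem.List.pyGetD s.toList i ' ') then count + 1 else count)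
      else count) 0

-- ===== PORT B =====
-- termination measure fact for B's while loop (cited by name, to keep the definition's term small)
lemma pvLoopDec (n x : Int) (h : x * x ≤ n) : (n + 1 - (x + 1)).toNat < (n + 1 - x).toNat := by
  have hxx : x ≤ x * x := by
    by_cases h0 : x ≤ 0
    · exact le_trans h0 (mul_self_nonneg x)
    · nlinarith
  omega

-- B's while loop `while x * x <= n: …; x += 1`
def pvIsPrimeLoopB (n x : Int) : Bool :=
  if x * x ≤ n then
    if PySem.Int.mod n x == 0 then false
    else pvIsPrimeLoopB n (x + 1)
  else true
termination_by (n + 1 - x).toNat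
decreasing_by exact pvLoopDec n x (by assumption)

def pvIsPrimeB (n : Int) : Bool := if n < 2 then false else pvIsPrimeLoopB n 2

-- sum(1 for i, c in enumerate(s, 1) if c in 'AEIOU' and is_prime(i))
def count_upper_prime_alt (s : String) : Int :=
  (((PySem.List.enumerate s.toList 1).filter
      (fun ic => pvVowels.contains ic.2 && pvIsPrimeB ic.1)).map (fun _ => (1 : Int))).sum

-- ===== PRECONDITION & SPEC =====
def Spec_count_upper_prime (s : String) (out : Int) : Prop := out = count_upper_prime_alt s
instance (s : String) (out : Int) : Decidable (Spec_count_upper_prime s out) := by unfold Spec_count_upper_prime; infer_instance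

-- ===== CLAIM (what is proved, stated in full; the proofs are below) =====
def Claim_equal_count_upper_prime : Prop := ∀ (s : String), Dom_count_upper_prime s → Spec_count_upper_prime s (count_upper_prime s)

-- ===== LEMMAS AND PROOFS =====

-- A's test answers "no divisor in [2, n/2]"
lemma pvIsPrimeA_char (n : Int) (h2 : 2 ≤ n) :
    pvIsPrimeA n = true ↔ ∀ x : Int, 2 ≤ x → x ≤ n / 2 → ¬ x ∣ n := by
  have hc : (n == 0 || n == 1) = false := by simp; omega
  simp only [pvIsPrimeA, hc, Bool.false_eq_true, if_false,
    PySem.Int.floordiv_eq_ediv_of_pos (show (0:Int) < 2 by norm_num)]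
  simp only [Bool.not_eq_true', List.any_eq_false, PySem.List.mem_pyRange_one, beq_iff_eq,
    PySem.Int.mod_eq_zero_iff_dvd]
  constructor
  · intro H x h2x hxle hdvd
    exact (H x ⟨h2x, by omega⟩) hdvd
  · intro H x hx hdvd
    exact H x hx.1 (by omega) hdvd

-- B's loop answers "no divisor d ≥ x with d*d ≤ n" (for 2 ≤ x)
lemma pvIsPrimeLoopB_char (n : Int) : ∀ x : Int, 2 ≤ x →
    (pvIsPrimeLoopB n x = true ↔ ∀ d : Int, x ≤ d → d * d ≤ n → ¬ d ∣ n) := by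
  intro x
  induction x using pvIsPrimeLoopB.induct (n := n) with
  | case1 x h hmod =>
    intro hx
    rw [pvIsPrimeLoopB, if_pos h, if_pos hmod]
    simp only [Bool.false_eq_true, false_iff]
    push Not
    exact ⟨x, le_refl x, h, (PySem.Int.mod_eq_zero_iff_dvd n x).mp (by simpa using hmod)⟩
  | case2 x h hmod ih =>
    intro hx
    rw [pvIsPrimeLoopB, if_pos h, if_neg hmod]
    rw [ih (by omega)]
    constructor
    · intro H d hd hdd hdvd
      rcases eq_or_lt_of_le hd with rfl | hlt
      · exact hmod (by simpa using (PySem.Int.mod_eq_zero_iff_dvd n x).mpr hdvd)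
      · exact H d (by omega) hdd hdvd
    · intro H d hd hdd hdvd
      exact H d (by omega) hdd hdvd
  | case3 x h =>
    intro hx
    rw [pvIsPrimeLoopB, if_neg h]
    simp only [true_iff]
    intro d hd hdd hdvd
    exact h (by nlinarith)

lemma pvIsPrimeB_char (n : Int) (h2 : 2 ≤ n) :
    pvIsPrimeB n = true ↔ ∀ d : Int, 2 ≤ d → d * d ≤ n → ¬ d ∣ n := by
  rw [pvIsPrimeB, if_neg (by omega)]
  exact pvIsPrimeLoopB_char n 2 (le_refl 2)

-- a composite n ≥ 2 has a divisor ≤ n/2 iff it has one whose square is ≤ n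
lemma pv_char_equiv (n : Int) (h2 : 2 ≤ n) :
    (∀ x : Int, 2 ≤ x → x ≤ n / 2 → ¬ x ∣ n) ↔ (∀ d : Int, 2 ≤ d → d * d ≤ n → ¬ d ∣ n) := by
  constructor
  · intro H d hd2 hdd hdvd
    refine H d hd2 ?_ hdvd
    rw [Int.le_ediv_iff_mul_le (by norm_num)]
    nlinarith
  · intro H x hx2 hxle hdvd
    by_cases hxx : x * x ≤ n
    · exact H x hx2 hxx hdvd
    · obtain ⟨k, hk⟩ := hdvd
      have hx0 : (0:Int) < x := by omega
      have h2x : x * 2 ≤ n := (Int.le_ediv_iff_mul_le (by norm_num)).mp hxle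
      have hk2 : 2 ≤ k := by nlinarith
      have hkx : k < x := by nlinarith
      exact H k hk2 (by nlinarith) ⟨x, by linarith [hk]⟩

lemma pv_prime_eq (n : Int) (h : 0 ≤ n) : pvIsPrimeA n = pvIsPrimeB n := by
  by_cases h0 : n = 0
  · subst h0; decide
  by_cases h1 : n = 1
  · subst h1; decide
  have h2 : 2 ≤ n := by omega
  rw [Bool.eq_iff_iff]
  exact ((pvIsPrimeA_char n h2).trans ((pv_char_equiv n h2).trans (pvIsPrimeB_char n h2).symm))

-- the counting loops agree, for any start offset k ≥ 0 and accumulator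
lemma pv_count_shift (xs : List Char) : ∀ (k acc : Int), 0 ≤ k →
    (PySem.List.enumerate xs k).foldl
      (fun count ic =>
        if pvIsPrimeA (ic.1 + 1) then
          (if pvVowels.contains ic.2 then count + 1 else count)
        else count) acc
  = acc + (((PySem.List.enumerate xs (k + 1)).filter
      (fun ic => pvVowels.contains ic.2 && pvIsPrimeB ic.1)).map (fun _ => (1 : Int))).sum := by
  induction xs with
  | nil => intro k acc _; simp [PySem.List.enumerate_nil]
  | cons c xs ih =>
    intro k acc hk
    rw [PySem.List.enumerate_cons, PySem.List.enumerate_cons]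
    simp only [List.foldl_cons, List.filter_cons]
    have hp : pvIsPrimeA (k + 1) = pvIsPrimeB (k + 1) := pv_prime_eq _ (by omega)
    rw [ih (k + 1) _ (by omega)]
    by_cases hv : c ∈ pvVowels <;>
      by_cases hpr : pvIsPrimeB (k + 1) = true <;>
        simp [hv, hpr, hp]
    all_goals omega

-- ===== VERDICT (by name: the statement is the Claim_ definition above) =====
theorem count_upper_prime_spec : Claim_equal_count_upper_prime := by
  intro s _
  unfold Spec_count_upper_prime count_upper_prime count_upper_prime_alt
  have hL : PySem.Str.len s = PySem.List.len s.toList := by simp [PySem.Str.len]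
  have h := pv_count_shift s.toList 0 0 (le_refl 0)
  rw [PySem.List.enumerate_eq_map_pyRange (xs := s.toList) ' ', List.foldl_map] at h
  simpa [hL] using h
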